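-- pv_equiv track=rewrite | github.com/always97/algorithm | BOJ/Bronze/tempCodeRunnerFile.py | find_lds
-- ===== SOURCE A (Python) =====
-- def find_lds(word):
--   n = len(word)
--   if n == 0:
--     return ""
--   lds = word[-1]
--
--   for i in range(n-2, -1, -1) :
--     if word[i] > lds[-1]:
--       lds += word[i]
--     else :
--       break;
--   return lds
-- ===== SOURCE B (Python) =====
-- def find_lds(word):
--   n = len(word)
--   if n == 0:
--     return ""
--   start = 0
--   for i in range(1, n):
--     if not (word[i] < word[i-1]):
--       start = i
--   return word[start:][::-1]
-- ===== Notes on version B (the rewrite author's own statement) =====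
-- stated objective: alternative
-- what changed: A scans backward from the end with an early break, appending characters while strictly greater; B does one full forward pass recording the start index of the final strictly-decreasing run and returns the reversed suffix word[start:][::-1].
import Mathlib
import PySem

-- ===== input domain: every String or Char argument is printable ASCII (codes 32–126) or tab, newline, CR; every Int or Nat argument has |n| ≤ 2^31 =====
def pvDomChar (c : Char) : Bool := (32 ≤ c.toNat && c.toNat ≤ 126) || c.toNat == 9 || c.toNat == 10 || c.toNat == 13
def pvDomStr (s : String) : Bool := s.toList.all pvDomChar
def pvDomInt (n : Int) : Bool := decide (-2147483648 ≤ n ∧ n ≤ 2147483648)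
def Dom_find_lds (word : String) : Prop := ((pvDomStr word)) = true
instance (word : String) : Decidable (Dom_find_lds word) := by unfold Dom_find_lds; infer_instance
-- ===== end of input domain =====

-- B replaces A's backward scan with early exit by a full forward pass that records the
-- start of the final strictly-decreasing run and returns the reversed suffix (objective: alternative).

-- ===== PORT A =====
-- A's backward loop: i runs n-2, n-3, …, 0; append word[i] while word[i] > lds[-1], else break.
def aLoop (cs : List Char) : Nat → List Char → List Char
  | i, lds =>
    match PySem.List.pyGet? cs (i : Int), lds.getLast? with
    | some c, some last =>
      if last < c then
        match i with
        | 0 => lds ++ [c]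
        | i' + 1 => aLoop cs i' (lds ++ [c])
      else lds
    | _, _ => lds

def find_lds (word : String) : String :=
  let cs := word.toList
  let n := cs.length
  if n = 0 then ""
  else
    -- lds = word[-1]: in range since n ≠ 0
    let c := PySem.List.pyGetD cs (-1) ' '
    if 2 ≤ n then String.mk (aLoop cs (n - 2) [c]) else String.mk [c]

-- ===== PORT B =====
-- B's forward pass: start := i whenever not (word[i] < word[i-1]); result = word[start:][::-1].
def bLoop (cs : List Char) : Nat :=
  List.foldl
    (fun (start : Nat) (i : Nat) =>
      if cs.getD i ' ' < cs.getD (i - 1) ' ' then start else i)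
    0 (List.range' 1 (cs.length - 1))

def find_lds_alt (word : String) : String :=
  let cs := word.toList
  if cs.length = 0 then ""
  else String.mk ((cs.drop (bLoop cs)).reverse)

-- ===== PRECONDITION & SPEC =====
def Spec_find_lds (word : String) (out : String) : Prop := out = find_lds_alt word
instance (word : String) (out : String) : Decidable (Spec_find_lds word out) := by unfold Spec_find_lds; infer_instance

-- ===== CLAIM (what is proved, stated in full; the proofs are below) =====
def Claim_equal_find_lds : Prop := ∀ (word : String), Dom_find_lds word → Spec_find_lds word (find_lds word)

-- ===== LEMMAS AND PROOFS =====

-- Common specification: the maximal strictly increasing prefix of the reversed string.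
def goIncr (prev : Char) : List Char → List Char
  | [] => []
  | d :: rest => if prev < d then d :: goIncr d rest else []

def takeIncr : List Char → List Char
  | [] => []
  | c :: rest => c :: goIncr c rest

theorem pyGet_nat (cs : List Char) (k : Nat) (h : k < cs.length) :
    PySem.List.pyGet? cs (k : Int) = some cs[k] := by
  rw [PySem.List.pyGet?_natCast, List.getElem?_eq_getElem h]

theorem aLoop_eq_goIncr (cs : List Char) :
    ∀ (i : Nat), i < cs.length → ∀ (lds : List Char) (l : Char),
      lds.getLast? = some l →
      aLoop cs i lds = lds ++ goIncr l ((cs.take (i + 1)).reverse) := by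
  intro i
  induction i with
  | zero =>
    intro hi lds l hl
    rw [aLoop, pyGet_nat cs 0 hi, hl]
    have ht : (cs.take (0 + 1)).reverse = [cs[0]] := by
      rw [List.take_add_one, List.getElem?_eq_getElem hi]
      simp
    rw [ht]
    by_cases h : l < cs[0] <;> simp [h, goIncr]
  | succ i' ih =>
    intro hi lds l hl
    rw [aLoop, pyGet_nat cs (i' + 1) hi, hl]
    have htake : (cs.take (i' + 1 + 1)).reverse = cs[i' + 1] :: (cs.take (i' + 1)).reverse := by
      rw [List.take_add_one, List.getElem?_eq_getElem hi]
      simp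
    rw [htake]
    by_cases h : l < cs[i' + 1]
    · simp only [h, if_true]
      rw [ih (by omega) (lds ++ [cs[i' + 1]]) cs[i' + 1] (by simp)]
      simp [goIncr, h]
    · simp [h, goIncr]

theorem find_lds_eq_takeIncr (word : String) :
    find_lds word = String.mk (takeIncr word.toList.reverse) := by
  rcases hcs : word.toList with _ | ⟨c0, rest⟩
  · simp [find_lds, hcs, takeIncr]
    rfl
  · have hne : (c0 :: rest) ≠ [] := List.cons_ne_nil _ _
    have hlen1 : ¬((c0 :: rest).length = 0) := by simp
    have hc : PySem.List.pyGetD (c0 :: rest) (-1) ' ' = (c0 :: rest).getLast hne :=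
      PySem.List.pyGetD_neg_one _ ' ' hne
    have hrev : (c0 :: rest).reverse = (c0 :: rest).getLast hne :: ((c0 :: rest).dropLast).reverse := by
      conv_lhs => rw [← List.dropLast_append_getLast hne]
      simp
    by_cases h2 : 2 ≤ (c0 :: rest).length
    · simp only [find_lds, hcs, if_neg hlen1, hc, if_pos h2]
      have hlt : (c0 :: rest).length - 2 < (c0 :: rest).length := by simp
      rw [aLoop_eq_goIncr (c0 :: rest) ((c0 :: rest).length - 2) hlt
            [(c0 :: rest).getLast hne] ((c0 :: rest).getLast hne) (by simp)]
      have ht : (c0 :: rest).length - 2 + 1 = (c0 :: rest).length - 1 := by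
        simp at h2 ⊢; omega
      rw [ht, hrev]
      simp [takeIncr, List.dropLast_eq_take]
    · have h1 : rest = [] := by
        rcases rest with _ | ⟨r, rs⟩
        · rfl
        · exfalso; apply h2; simp only [List.length_cons]; omega
      subst h1
      simp only [find_lds, hcs, if_neg hlen1, hc, if_neg h2]
      simp [takeIncr, goIncr]

theorem bfold_mem (cs : List Char) :
    ∀ (l : List Nat) (a : Nat),
      List.foldl (fun (start : Nat) (i : Nat) =>
        if cs.getD i ' ' < cs.getD (i - 1) ' ' then start else i) a l = a ∨
      List.foldl (fun (start : Nat) (i : Nat) =>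
        if cs.getD i ' ' < cs.getD (i - 1) ' ' then start else i) a l ∈ l := by
  intro l
  induction l with
  | nil => intro a; left; rfl
  | cons x xs ih =>
    intro a
    simp only [List.foldl_cons]
    by_cases h : cs.getD x ' ' < cs.getD (x - 1) ' '
    · simp only [if_pos h]
      rcases ih a with h1 | h1
      · left; exact h1
      · right; exact List.mem_cons_of_mem _ h1
    · simp only [if_neg h]
      rcases ih x with h1 | h1
      · right; rw [h1]; exact List.mem_cons_self
      · right; exact List.mem_cons_of_mem _ h1

theorem bLoop_le (cs : List Char) (hne : cs ≠ []) : bLoop cs ≤ cs.length - 1 := by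
  unfold bLoop
  rcases bfold_mem cs (List.range' 1 (cs.length - 1)) 0 with h | h
  · omega
  · rw [List.mem_range'] at h
    omega

theorem drop_bLoop_eq (cs : List Char) (hne : cs ≠ []) :
    (cs.drop (bLoop cs)).reverse = takeIncr cs.reverse := by
  induction cs using List.reverseRecOn with
  | nil => simp at hne
  | append_singleton ys z ih =>
    by_cases hysne : ys = []
    · subst hysne
      simp [bLoop, takeIncr, goIncr]
    · have hm : 1 ≤ ys.length := List.length_pos_of_ne_nil hysne
      have hlen : (ys ++ [z]).length - 1 = ys.length := by simp
      have hsplit : List.range' 1 ys.length = List.range' 1 (ys.length - 1) ++ [ys.length] := by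
        obtain ⟨k, hk⟩ : ∃ k, ys.length = k + 1 := ⟨ys.length - 1, by omega⟩
        rw [hk, List.range'_concat]
        simp [Nat.add_comm]
      have hfold : List.foldl (fun (start : Nat) (i : Nat) =>
            if (ys ++ [z]).getD i ' ' < (ys ++ [z]).getD (i - 1) ' ' then start else i)
            0 (List.range' 1 (ys.length - 1))
          = bLoop ys := by
        unfold bLoop
        apply PySem.List.foldl_congr_mem
        intro a i hi
        rw [List.mem_range'] at hi
        rw [List.getD_append _ _ _ _ (by omega), List.getD_append _ _ _ _ (by omega)]
      have hzidx : (ys ++ [z]).getD ys.length ' ' = z := by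
        rw [List.getD_append_right _ _ _ _ (le_refl _)]
        simp
      have hlast : (ys ++ [z]).getD (ys.length - 1) ' ' = ys.getLast hysne := by
        rw [List.getD_append _ _ _ _ (by omega)]
        rw [List.getLast_eq_getElem]
        exact List.getD_eq_getElem ys ' ' (by omega)
      have hbl : bLoop (ys ++ [z]) =
          if z < ys.getLast hysne then bLoop ys else ys.length := by
        conv_lhs => unfold bLoop
        rw [hlen, hsplit, List.foldl_append, hfold]
        simp only [List.foldl_cons, List.foldl_nil]
        rw [hzidx, hlast]
      have hrevy : ys.reverse = ys.getLast hysne :: (ys.dropLast).reverse := by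
        conv_lhs => rw [← List.dropLast_append_getLast hysne]
        simp
      rw [hbl]
      by_cases hz : z < ys.getLast hysne
      · rw [if_pos hz]
        have hle : bLoop ys ≤ ys.length := le_trans (bLoop_le ys hysne) (by omega)
        rw [List.drop_append_of_le_length hle, List.reverse_append]
        simp only [List.reverse_singleton, List.singleton_append]
        rw [ih hysne, List.reverse_append]
        simp only [List.reverse_singleton, List.singleton_append]
        rw [hrevy]
        simp [takeIncr, goIncr, hz]
      · rw [if_neg hz, List.drop_left]
        simp [takeIncr, hrevy, goIncr, hz]

theorem find_lds_alt_eq_takeIncr (word : String) :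
    find_lds_alt word = String.mk (takeIncr word.toList.reverse) := by
  unfold find_lds_alt
  rcases hcs : word.toList with _ | ⟨c, rest⟩
  · simp [takeIncr]
    rfl
  · simp only [List.length_cons]
    rw [if_neg (by omega)]
    rw [drop_bLoop_eq (c :: rest) (by simp)]

-- ===== VERDICT (by name: the statement is the Claim_ definition above) =====
theorem find_lds_spec : Claim_equal_find_lds := by
  intro word _
  unfold Spec_find_lds
  rw [find_lds_eq_takeIncr, find_lds_alt_eq_takeIncr]
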